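-- pv_equiv track=rewrite | github.com/honeyhyuni/algorithm | programmers_level1/get_DeclarationreResult.py | solution
-- ===== SOURCE A (Python) =====
-- def solution(id_list, report, k):
--     answer = []
--     result = {}
--     dic = {}
--     for i in id_list:
--         dic[i] = []
--         result[i] = 0
--     for i in set(report):  # 중복 신고 불가
--         i = i.split()
--         dic[i[0]].append(i[1])
--         result[i[1]] += 1
--     for j in dic.values():
--         temp = 0
--         for _ in j:
--             if result[_] >= k:
--                 temp += 1
--         answer.append(temp)
--     return answer
-- ===== SOURCE B (Python) =====
-- def solution(id_list, report, k):
--     # Inverted index: group deduplicated reports by REPORTED user; a user with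
--     # >= k distinct reporters is banned, and each of those reporters gets credit.
--     by_target = {}
--     for r in set(report):
--         p = r.split()
--         by_target.setdefault(p[1], []).append(p[0])
--     ans = {i: 0 for i in id_list}
--     for srcs in by_target.values():
--         if len(srcs) >= k:
--             for s in srcs:
--                 ans[s] += 1
--     return list(ans.values())
-- ===== Notes on version B (the rewrite author's own statement) =====
-- stated objective: alternative
-- what changed: B inverts the indexing: instead of A's per-reporter lists plus a separate per-user report-count dict that is rescanned list by list, B builds one dict grouping deduplicated reports by the REPORTED user, decides the ban directly from the length of each reporter group, and pushes one credit to each reporter of a banned user.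
import Mathlib
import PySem

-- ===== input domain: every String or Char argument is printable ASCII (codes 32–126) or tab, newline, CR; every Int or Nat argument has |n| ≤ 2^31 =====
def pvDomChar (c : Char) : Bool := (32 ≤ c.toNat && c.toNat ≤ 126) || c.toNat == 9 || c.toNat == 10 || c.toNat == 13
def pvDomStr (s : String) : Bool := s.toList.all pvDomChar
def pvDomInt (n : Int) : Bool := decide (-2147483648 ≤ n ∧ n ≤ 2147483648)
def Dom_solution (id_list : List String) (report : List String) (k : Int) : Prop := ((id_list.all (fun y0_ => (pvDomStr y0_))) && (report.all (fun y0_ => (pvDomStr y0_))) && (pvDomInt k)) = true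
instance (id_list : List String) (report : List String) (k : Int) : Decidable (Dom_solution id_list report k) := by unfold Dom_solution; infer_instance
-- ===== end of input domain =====

-- B inverts the index: one dict grouping deduplicated reports by the REPORTED user,
-- ban decided by the group's length, credit pushed to each reporter of a banned user
-- (objective: alternative decomposition; A keeps per-reporter lists plus a count dict).

-- ===== PORT A =====
-- shared token helper: r.split()[n]; Python raises IndexError where pyGet? is none (excluded by Pre_)
def pvTok (s : String) (n : Int) : String := (PySem.List.pyGet? (PySem.Str.split₀ s) n).getD ""

def solution (id_list : List String) (report : List String) (k : Int) : List Int :=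
  -- answer = []; dic = {}; result = {}; for i in id_list: dic[i] = []; result[i] = 0
  let init : PySem.Dict String (List String) × PySem.Dict String Int :=
    id_list.foldl (fun p i => (p.1.insert i [], p.2.insert i (0 : Int)))
      (PySem.Dict.empty, PySem.Dict.empty)
  -- for i in set(report): i = i.split(); dic[i[0]].append(i[1]); result[i[1]] += 1
  let st :=
    (PySem.Set.ofList report).foldl
      (fun p s => (p.1.modify (pvTok s 0) [] (fun l => l ++ [pvTok s 1]),
                   p.2.modify (pvTok s 1) 0 (fun c => c + 1))) init
  -- for j in dic.values(): temp = 0; for _ in j: if result[_] >= k: temp += 1; answer.append(temp)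
  st.1.values.foldl
    (fun ans j =>
      ans ++ [j.foldl (fun temp u => if st.2.getD u 0 ≥ k then temp + 1 else temp) (0 : Int)])
    []

-- ===== PORT B =====
def solution_alt (id_list : List String) (report : List String) (k : Int) : List Int :=
  -- by_target = {}; for r in set(report): p = r.split(); by_target.setdefault(p[1], []).append(p[0])
  let by_target :=
    (PySem.Set.ofList report).foldl
      (fun d r => d.modify (pvTok r 1) [] (fun l => l ++ [pvTok r 0]))
      (PySem.Dict.empty : PySem.Dict String (List String))
  -- ans = {i: 0 for i in id_list}
  let ans0 := id_list.foldl (fun d i => d.insert i (0 : Int)) PySem.Dict.empty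
  -- for srcs in by_target.values(): if len(srcs) >= k: for s in srcs: ans[s] += 1
  let ans :=
    by_target.values.foldl
      (fun d srcs =>
        if (srcs.length : Int) ≥ k then
          srcs.foldl (fun d s => d.modify s 0 (fun c => c + 1)) d
        else d) ans0
  -- return list(ans.values())
  ans.values

-- ===== PRECONDITION & SPEC =====
-- Pre_ excludes exactly the inputs where A raises: a report line with fewer than two
-- whitespace-separated tokens (IndexError) or a token not in id_list (KeyError).
def Pre_solution (id_list : List String) (report : List String) (_k : Int) : Prop :=
  ∀ s ∈ report, 2 ≤ (PySem.Str.split₀ s).length ∧ pvTok s 0 ∈ id_list ∧ pvTok s 1 ∈ id_list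
instance (id_list : List String) (report : List String) (k : Int) : Decidable (Pre_solution id_list report k) := by unfold Pre_solution; infer_instance

def pvWitness_solution : List String × List String × Int :=
  (["muzi", "frodo", "apeach"], ["muzi frodo", "apeach frodo"], 2)

def Spec_solution (id_list : List String) (report : List String) (k : Int) (out : List Int) : Prop := out = solution_alt id_list report k
instance (id_list : List String) (report : List String) (k : Int) (out : List Int) : Decidable (Spec_solution id_list report k out) := by unfold Spec_solution; infer_instance

-- ===== CLAIM (what is proved, stated in full; the proofs are below) =====
def Claim_equal_solution : Prop := ∀ (id_list : List String) (report : List String) (k : Int), Dom_solution id_list report k → Pre_solution id_list report k → Spec_solution id_list report k (solution id_list report k)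

-- ===== LEMMAS AND PROOFS =====

-- the pair-state folds of port A split into their independent components
theorem pv_splitA :
    ∀ (l : List String) (p : PySem.Dict String (List String) × PySem.Dict String Int),
      l.foldl (fun p i => (p.1.insert i [], p.2.insert i (0 : Int))) p
        = (l.foldl (fun d i => d.insert i []) p.1, l.foldl (fun d i => d.insert i 0) p.2) := by
  intro l
  induction l with
  | nil => intro p; rfl
  | cons x xs ih => intro p; simp only [List.foldl_cons, ih]

theorem pv_splitB :
    ∀ (l : List String) (p : PySem.Dict String (List String) × PySem.Dict String Int),
      l.foldl (fun p s => (p.1.modify (pvTok s 0) [] (fun j => j ++ [pvTok s 1]),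
                           p.2.modify (pvTok s 1) 0 (fun c => c + 1))) p
        = (l.foldl (fun d s => d.modify (pvTok s 0) [] (fun j => j ++ [pvTok s 1])) p.1,
           l.foldl (fun d s => d.modify (pvTok s 1) 0 (fun c => c + 1)) p.2) := by
  intro l
  induction l with
  | nil => intro p; rfl
  | cons x xs ih => intro p; simp only [List.foldl_cons, ih]

-- initialising every key to the default leaves every getD at the default
theorem pv_getD_init {ν : Type} (z : ν) :
    ∀ (l : List String) (d : PySem.Dict String ν), (∀ u, d.getD u z = z) →
      ∀ u, (l.foldl (fun d i => d.insert i z) d).getD u z = z := by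
  intro l
  induction l with
  | nil => intro d h u; exact h u
  | cons x xs ih =>
      intro d h u
      refine ih _ (fun v => ?_) u
      rw [PySem.Dict.getD_insert]
      split <;> simp [h]

-- building the answer list by appending singletons is a map
theorem pv_foldl_append_map {α : Type} (f : α → Int) :
    ∀ (l : List α) (acc : List Int), l.foldl (fun a x => a ++ [f x]) acc = acc ++ l.map f := by
  intro l
  induction l with
  | nil => intro acc; simp
  | cons x xs ih => intro acc; simp [List.foldl_cons, ih]

-- counting loop: 'temp += 1 if p u' is countP
theorem pv_foldl_count {α : Type} (p : α → Prop) [DecidablePred p] :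
    ∀ (l : List α) (t : Int),
      l.foldl (fun t u => if p u then t + 1 else t) t = t + (l.countP (fun u => decide (p u)) : Int) := by
  intro l
  induction l with
  | nil => intro t; simp
  | cons x xs ih =>
      intro t
      simp only [List.foldl_cons, List.countP_cons, ih]
      by_cases h : p x <;> (simp [h]; try ring)

-- updating a set with elements it already has is the identity
theorem pv_update_subset (s : PySem.Set String) (l : List String) (h : ∀ x ∈ l, x ∈ s) :
    PySem.Set.update s l = s := by
  rw [PySem.Set.update_eq_append_filter]
  have hnil : (PySem.Set.ofList l).filter (fun y => !(PySem.Set.contains s y)) = [] := by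
    apply List.filter_eq_nil_iff.2
    intro y hy
    have hys : y ∈ s := h y ((PySem.Set.mem_ofList l y).1 hy)
    simpa using hys
  rw [hnil, List.append_nil]

-- counting fold over a dict, keyed through f
theorem pv_getD_cnt {α : Type} (f : α → String) :
    ∀ (l : List α) (d : PySem.Dict String Int) (u : String),
      (l.foldl (fun d s => d.modify (f s) 0 (fun c => c + 1)) d).getD u 0
        = d.getD u 0 + ((l.map f).count u : Int) := by
  intro l
  induction l with
  | nil => intro d u; simp
  | cons x xs ih =>
      intro d u
      simp only [List.foldl_cons, ih, List.map_cons, List.count_cons]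
      rw [PySem.Dict.getD_modify]
      by_cases h : u = f x
      · simp [h]; ring
      · have hb : (f x == u) = false := by
          simp only [beq_eq_false_iff_ne, ne_eq]; exact fun e => h e.symm
        simp [h, hb]

-- grouping fold over a dict: d[f s].append(g s)
theorem pv_getD_grp (f g : String → String) :
    ∀ (l : List String) (d : PySem.Dict String (List String)) (i : String),
      (l.foldl (fun d s => d.modify (f s) [] (fun xs => xs ++ [g s])) d).getD i []
        = d.getD i [] ++ (l.filter (fun s => f s == i)).map g := by
  intro l
  induction l with
  | nil => intro d i; simp
  | cons x xs ih =>
      intro d i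
      simp only [List.foldl_cons, ih, List.filter_cons]
      rw [PySem.Dict.getD_modify]
      by_cases h : i = f x
      · simp [h]
      · have hb : (f x == i) = false := by
          simp only [beq_eq_false_iff_ne, ne_eq]; exact fun e => h e.symm
        simp [h, hb]

-- keys of the inner credit loop: an update by the group's members
theorem pv_keys_inner :
    ∀ (srcs : List String) (d : PySem.Dict String Int),
      (srcs.foldl (fun d s => d.modify s 0 (fun c => c + 1)) d).keys
        = PySem.Set.update d.keys srcs := by
  intro srcs d
  have h := PySem.Dict.keys_foldl_modify_key (l := srcs) (key := fun s => s)
    (d0 := (0 : Int)) (f := fun _ s => fun c => c + 1) (d := d)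
  simpa using h
-- keys of B's outer loop are unchanged when every credited reporter already has a key
theorem pv_keys_outer (k : Int) :
    ∀ (l : List (List String)) (d : PySem.Dict String Int),
      (∀ srcs ∈ l, ∀ s ∈ srcs, s ∈ d.keys) →
      (l.foldl
        (fun d srcs =>
          if (srcs.length : Int) ≥ k then
            srcs.foldl (fun d s => d.modify s 0 (fun c => c + 1)) d
          else d) d).keys = d.keys := by
  intro l
  induction l with
  | nil => intro d _; rfl
  | cons x xs ih =>
      intro d h
      simp only [List.foldl_cons]
      by_cases hx : (x.length : Int) ≥ k
      · rw [if_pos hx]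
        have hk : (x.foldl (fun d s => d.modify s 0 (fun c => c + 1)) d).keys = d.keys := by
          rw [pv_keys_inner, pv_update_subset _ _ (h x (by simp))]
        rw [ih _ (by intro srcs hs s hss; rw [hk]; exact h srcs (by simp [hs]) s hss), hk]
      · rw [if_neg hx]
        exact ih _ (fun srcs hs s hss => h srcs (by simp [hs]) s hss)

-- getD through B's outer loop: a sum of per-group contributions
theorem pv_getD_outer (k : Int) (i : String) :
    ∀ (l : List (List String)) (d : PySem.Dict String Int),
      (l.foldl
        (fun d srcs =>
          if (srcs.length : Int) ≥ k then
            srcs.foldl (fun d s => d.modify s 0 (fun c => c + 1)) d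
          else d) d).getD i 0
        = d.getD i 0
          + (l.map (fun srcs => if (srcs.length : Int) ≥ k then (srcs.count i : Int) else 0)).sum := by
  intro l
  induction l with
  | nil => intro d; simp
  | cons x xs ih =>
      intro d
      simp only [List.foldl_cons, List.map_cons, List.sum_cons]
      by_cases hx : (x.length : Int) ≥ k
      · rw [if_pos hx, if_pos hx, ih]
        have h := pv_getD_cnt (fun s => s) x d i
        simp only [List.map_id'] at h
        rw [h]; ring
      · rw [if_neg hx, if_neg hx, ih]; ring

-- splitting countP along a boolean test
theorem pv_countP_split {α : Type} (p q : α → Bool) (l : List α) :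
    l.countP q = (l.filter p).countP q + (l.filter (fun a => !p a)).countP q := by
  induction l with
  | nil => simp
  | cons x xs ih =>
      simp only [List.countP_cons, List.filter_cons]
      by_cases hp : p x <;> by_cases hq : q x <;> simp [hp, hq, ih] <;> omega

-- a sum of per-class counts over a nodup list of classes covering l is a count over l
theorem pv_sum_partition {α : Type} (f : α → String) (q : α → Bool) :
    ∀ (T : List String), T.Nodup → ∀ (l : List α), (∀ a ∈ l, f a ∈ T) →
      (T.map (fun t => (((l.filter (fun a => f a == t)).countP q : Nat) : Int))).sum
        = ((l.countP q : Nat) : Int) := by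
  intro T
  induction T with
  | nil =>
      intro _ l h
      have : l = [] := by
        cases l with
        | nil => rfl
        | cons a l' => exact absurd (h a (by simp)) (by simp)
      simp [this]
  | cons t T' ih =>
      intro hnd l h
      simp only [List.map_cons, List.sum_cons]
      have hnd' : T'.Nodup := (List.nodup_cons.1 hnd).2
      have htT' : t ∉ T' := (List.nodup_cons.1 hnd).1
      set l' := l.filter (fun a => !(f a == t)) with hl'
      have hcov : ∀ a ∈ l', f a ∈ T' := by
        intro a ha
        have ham := List.mem_of_mem_filter ha
        have hne : (f a == t) = false := by
          have := List.of_mem_filter ha; simpa using this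
        rcases h a ham with hmem
        rcases List.mem_cons.1 hmem with he | hm
        · exact absurd (by simp [he]) (by simp [hne] : ¬ (f a == t) = true)
        · exact hm
      have hterms : T'.map (fun t' => (((l.filter (fun a => f a == t')).countP q : Nat) : Int))
          = T'.map (fun t' => (((l'.filter (fun a => f a == t')).countP q : Nat) : Int)) := by
        apply List.map_congr_left
        intro t' ht'
        have hne : t' ≠ t := fun e => htT' (e ▸ ht')
        have : l'.filter (fun a => f a == t') = l.filter (fun a => f a == t') := by
          rw [hl', List.filter_filter]
          apply List.filter_congr
          intro a _
          by_cases hb : f a == t'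
          · have : (f a == t) = false := by
              have hfa : f a = t' := by simpa using hb
              simp [hfa, hne]
            simp [hb, this]
          · simp [hb]
        rw [this]
      rw [hterms, ih hnd' l' hcov]
      have := pv_countP_split (fun a => f a == t) q l
      rw [hl']
      push_cast [this]
      ring

theorem solution_eq (id_list report : List String) (k : Int)
    (hpre : Pre_solution id_list report k) :
    solution id_list report k = solution_alt id_list report k := by
  have hpre' : ∀ s ∈ PySem.Set.ofList report,
      pvTok s 0 ∈ id_list ∧ pvTok s 1 ∈ id_list :=
    fun s hs => ((hpre s ((PySem.Set.mem_ofList report s).1 hs)).2)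
  unfold solution solution_alt
  dsimp only
  rw [pv_splitA, pv_splitB]
  dsimp only
  set R := PySem.Set.ofList report with hR
  set dic0 := id_list.foldl (fun d i => d.insert i ([] : List String)) PySem.Dict.empty with hdic0
  set res0 := id_list.foldl (fun d i => d.insert i (0 : Int)) PySem.Dict.empty with hres0
  set dic := R.foldl (fun d s => d.modify (pvTok s 0) [] (fun j => j ++ [pvTok s 1])) dic0 with hdic
  set res := R.foldl (fun d s => d.modify (pvTok s 1) 0 (fun c => c + 1)) res0 with hres
  set bt := R.foldl (fun d r => d.modify (pvTok r 1) [] (fun l => l ++ [pvTok r 0]))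
      (PySem.Dict.empty : PySem.Dict String (List String)) with hbt
  have hnd : (PySem.Set.ofList id_list).Nodup := PySem.Set.nodup_ofList id_list
  have hdic0getD : ∀ u, dic0.getD u [] = [] := by
    intro u
    rw [hdic0]
    exact pv_getD_init [] id_list PySem.Dict.empty (fun v => by simp) u
  have hres0getD : ∀ u, res0.getD u 0 = 0 := by
    intro u
    rw [hres0]
    exact pv_getD_init 0 id_list PySem.Dict.empty (fun v => by simp) u
  have hkeys0 : dic0.keys = PySem.Set.ofList id_list := by
    rw [hdic0, PySem.Dict.keys_foldl_insert, PySem.Dict.keys_empty, PySem.Set.update_nil_left]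
  have hkeys0' : res0.keys = PySem.Set.ofList id_list := by
    rw [hres0, PySem.Dict.keys_foldl_insert, PySem.Dict.keys_empty, PySem.Set.update_nil_left]
  have hkeysdic : dic.keys = PySem.Set.ofList id_list := by
    rw [hdic, PySem.Dict.keys_foldl_modify_key, hkeys0]
    apply pv_update_subset
    intro x hx
    rcases List.mem_map.1 hx with ⟨s, hs, rfl⟩
    exact (PySem.Set.mem_ofList _ _).2 (hpre' s hs).1
  have hresgetD : ∀ u, res.getD u 0 = ((R.map (fun s => pvTok s 1)).count u : Int) := by
    intro u
    rw [hres, pv_getD_cnt, hres0getD, zero_add]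
  have hdicgetD : ∀ i, dic.getD i [] =
      (R.filter (fun s => pvTok s 0 == i)).map (fun s => pvTok s 1) := by
    intro i
    rw [hdic, pv_getD_grp, hdic0getD, List.nil_append]
  -- target index of B
  have hkeysbt : bt.keys = PySem.Set.ofList (R.map (fun s => pvTok s 1)) := by
    rw [hbt, PySem.Dict.keys_foldl_modify_key, PySem.Dict.keys_empty, PySem.Set.update_nil_left]
  have hbtgetD : ∀ t, bt.getD t [] =
      (R.filter (fun s => pvTok s 1 == t)).map (fun s => pvTok s 0) := by
    intro t
    rw [hbt, pv_getD_grp]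
    simp
  have hbtnd : bt.keys.Nodup := by rw [hkeysbt]; exact PySem.Set.nodup_ofList _
  -- A's outer loop is a map over dic.values, which is a map over the distinct ids
  rw [pv_foldl_append_map, List.nil_append,
      PySem.Dict.values_eq_map_keys dic (by rw [hkeysdic]; exact hnd) [], hkeysdic, List.map_map]
  -- B's side: values of bt, then getD of the outer loop
  rw [PySem.Dict.values_eq_map_keys bt hbtnd []]
  have hcred : ∀ srcs ∈ bt.keys.map (fun t => bt.getD t []), ∀ s ∈ srcs,
      s ∈ res0.keys := by
    intro srcs hs s hss
    rcases List.mem_map.1 hs with ⟨t, _, rfl⟩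
    rw [hbtgetD] at hss
    rcases List.mem_map.1 hss with ⟨r, hr, rfl⟩
    rw [hkeys0']
    exact (PySem.Set.mem_ofList _ _).2 (hpre' r (List.mem_of_mem_filter hr)).1
  have hkeysans :
      ((bt.keys.map (fun t => bt.getD t [])).foldl
        (fun d srcs =>
          if (srcs.length : Int) ≥ k then
            srcs.foldl (fun d s => d.modify s 0 (fun c => c + 1)) d
          else d) res0).keys = PySem.Set.ofList id_list := by
    rw [pv_keys_outer _ _ _ hcred, hkeys0']
  rw [PySem.Dict.values_eq_map_keys _ (by rw [hkeysans]; exact hnd) 0, hkeysans]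
  apply List.map_congr_left
  intro i _
  simp only [Function.comp]
  -- both sides as countP over R of the same predicate
  rw [pv_getD_outer, hres0getD, zero_add, List.map_map]
  rw [hdicgetD i, pv_foldl_count (fun u => res.getD u 0 ≥ k), zero_add]
  have hterm : bt.keys.map
        ((fun srcs => if (srcs.length : Int) ≥ k then (srcs.count i : Int) else 0)
          ∘ fun t => bt.getD t [])
      = bt.keys.map (fun t =>
          (((R.filter (fun a => pvTok a 1 == t)).countP
            (fun s => (pvTok s 0 == i) && decide (res.getD (pvTok s 1) 0 ≥ k)) : Nat) : Int)) := by
    apply List.map_congr_left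
    intro t _
    simp only [Function.comp, hbtgetD t]
    rw [List.length_map, List.count_eq_countP, List.countP_map]
    have hlen : ((R.filter (fun s => pvTok s 1 == t)).length : Int)
        = ((R.countP (fun s => pvTok s 1 == t) : Nat) : Int) := by
      rw [List.countP_eq_length_filter]
    by_cases hk : (((R.filter (fun s => pvTok s 1 == t)).length : Nat) : Int) ≥ k
    · rw [if_pos hk]
      congr 1
      apply List.countP_congr
      intro s hs
      have ht : pvTok s 1 = t := by simpa using List.of_mem_filter hs
      have : res.getD (pvTok s 1) 0 ≥ k := by
        rw [hresgetD, ht, List.count_eq_countP, List.countP_map]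
        rw [hlen] at hk
        simpa [Function.comp] using hk
      simp [Function.comp, this]
    · rw [if_neg hk]
      have : (R.filter (fun a => pvTok a 1 == t)).countP
          (fun s => (pvTok s 0 == i) && decide (res.getD (pvTok s 1) 0 ≥ k)) = 0 := by
        rw [List.countP_eq_zero]
        intro s hs
        have ht : pvTok s 1 = t := by simpa using (List.of_mem_filter hs)
        have hlt : ¬ res.getD (pvTok s 1) 0 ≥ k := by
          rw [hresgetD, ht, List.count_eq_countP, List.countP_map]
          rw [hlen] at hk
          simpa [Function.comp] using hk
        simp [hlt]
      rw [this]; simp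
  rw [hterm, hkeysbt,
      pv_sum_partition (fun s => pvTok s 1)
        (fun s => (pvTok s 0 == i) && decide (res.getD (pvTok s 1) 0 ≥ k))
        _ (PySem.Set.nodup_ofList _) R
        (fun a ha => (PySem.Set.mem_ofList _ _).2 (List.mem_map.2 ⟨a, ha, rfl⟩))]
  -- A's value at i equals the same countP
  rw [List.countP_map, List.countP_filter]
  congr 1
  apply List.countP_congr
  intro s _
  simp [Function.comp, Bool.and_comm]

-- ===== VERDICT (by name: the statement is the Claim_ definition above) =====
theorem solution_spec : Claim_equal_solution := by
  intro id_list report k _ hpre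
  unfold Spec_solution
  exact solution_eq id_list report k hpre
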